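-- pv_equiv track=rewrite | github.com/lasersonlab/pepsyn | pepsyn/operations.py | x_to_ggsg
-- ===== SOURCE A (Python) =====
-- from itertools import cycle
--
-- def _ggsg_generator():
--     """generates infinite sequence of 'G', 'G', 'S', 'G'"""
--     for aa in cycle("GGSG"):
--         yield aa
--
-- def x_to_ggsg(seq):
--     """replace Xs with a Serine-Glycine linker (GGSG pattern)
--
--     seq and return value are strings
--     """
--     if "X" not in seq:
--         return seq
--     replacement = []
--     ggsg = _ggsg_generator()
--     for aa in seq:
--         if aa != "X":
--             replacement.append(aa)
--             # restart linker iterator for next stretch of Xs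
--             ggsg = _ggsg_generator()
--         else:
--             replacement.append(next(ggsg))
--     return "".join(replacement)
-- ===== SOURCE B (Python) =====
-- def x_to_ggsg(seq):
--     """replace Xs with a Serine-Gly linker: fill each maximal run of X's at once
--     with a closed-form slice of repeated 'GGSG' (run-based, not per-character)."""
--     if 'X' not in seq:
--         return seq
--     out = []
--     i, n = 0, len(seq)
--     while i < n:
--         c = seq[i]
--         if c == 'X':
--             j = i + 1
--             while j < n and seq[j] == 'X':
--                 j += 1
--             r = j - i
--             out.append(('GGSG' * ((r + 3) // 4))[:r])
--             i = j
--         else: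
--             out.append(c)
--             i += 1
--     return ''.join(out)
-- ===== Notes on version B (the rewrite author's own statement) =====
-- stated objective: alternative
-- what changed: replaces the per-character loop with a restarting linker generator by a run-based scan: each maximal run of X's is filled in one step with a closed-form slice of the repeated four-residue linker motif
import Mathlib
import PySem

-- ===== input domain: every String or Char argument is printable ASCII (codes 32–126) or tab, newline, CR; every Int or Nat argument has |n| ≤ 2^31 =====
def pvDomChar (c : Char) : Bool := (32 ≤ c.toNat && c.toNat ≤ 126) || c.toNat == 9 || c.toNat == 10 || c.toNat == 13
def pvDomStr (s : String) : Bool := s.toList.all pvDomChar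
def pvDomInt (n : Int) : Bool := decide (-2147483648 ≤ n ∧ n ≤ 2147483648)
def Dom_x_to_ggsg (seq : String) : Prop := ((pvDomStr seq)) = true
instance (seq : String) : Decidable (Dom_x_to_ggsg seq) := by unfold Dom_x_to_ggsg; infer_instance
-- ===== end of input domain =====

-- B replaces A's per-character loop (with a GGSG generator restarted after every
-- non-X) by a run-based scan that fills each maximal X-run at once with a
-- closed-form slice of repeated "GGSG"; objective: alternative (same cost).

-- ===== PORT A =====
-- next(ggsg) where the generator has already been advanced k times: cycle "GGSG" at index k % 4
def ggsgNext (k : Nat) : Char := ("GGSG".toList).getD (k % 4) 'G'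

-- the for-loop over seq, state k = how far the current generator has been advanced
-- (a fresh generator after a non-X character is k = 0)
def xloopA : List Char → Nat → List Char
  | [], _ => []
  | a :: rest, k =>
    if a == 'X' then ggsgNext k :: xloopA rest (k + 1)
    else a :: xloopA rest 0

def x_to_ggsg (seq : String) : String :=
  -- '"X" not in seq' (single-character substring test, exact via PySem.Str.isIn)
  if PySem.Str.isIn "X" seq then String.ofList (xloopA seq.toList 0) else seq

-- ===== PORT B =====
-- ('GGSG' * ((r + 3) // 4))[:r]
def ggsgLinker (r : Nat) : List Char :=
  ((List.replicate ((r + 3) / 4) "GGSG".toList).flatten).take r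

-- the outer while-loop of Source B: the inner 'while seq[j] == X' scan is takeWhile/dropWhile
def xloopB : List Char → List Char
  | [] => []
  | a :: rest =>
    if a == 'X' then
      ggsgLinker (1 + (rest.takeWhile (· == 'X')).length) ++
        xloopB (rest.dropWhile (· == 'X'))
    else a :: xloopB rest
termination_by l => l.length
decreasing_by
  · have := List.length_dropWhile_le (p := (· == 'X')) (l := rest)
    simp; omega
  · simp

def x_to_ggsg_alt (seq : String) : String :=
  if PySem.Str.isIn "X" seq then String.ofList (xloopB seq.toList) else seq

-- ===== PRECONDITION & SPEC =====
def Spec_x_to_ggsg (seq : String) (out : String) : Prop := out = x_to_ggsg_alt seq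
instance (seq : String) (out : String) : Decidable (Spec_x_to_ggsg seq out) := by unfold Spec_x_to_ggsg; infer_instance

-- ===== CLAIM (what is proved, stated in full; the proofs are below) =====
def Claim_equal_x_to_ggsg : Prop := ∀ (seq : String), Dom_x_to_ggsg seq → Spec_x_to_ggsg seq (x_to_ggsg seq)

-- ===== LEMMAS AND PROOFS =====

-- the first n outputs of a generator already advanced k times
def linkerFrom (k n : Nat) : List Char := (List.range n).map (fun i => ggsgNext (k + i))

theorem ggsgNext_add_four (i : Nat) : ggsgNext (4 + i) = ggsgNext i := by
  simp [ggsgNext, Nat.add_mod_left]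

theorem flatten_replicate_ggsg (m : Nat) :
    (List.replicate m "GGSG".toList).flatten = (List.range (4 * m)).map ggsgNext := by
  induction m with
  | zero => simp
  | succ m ih =>
    have h4 : 4 * (m + 1) = 4 + 4 * m := by ring
    have hmap : List.map (ggsgNext ∘ fun x => 4 + x) (List.range (4 * m)) =
        List.map ggsgNext (List.range (4 * m)) :=
      List.map_congr_left fun i _ => ggsgNext_add_four i
    have hg : "GGSG".toList = (List.range 4).map ggsgNext := by decide
    rw [List.replicate_succ, List.flatten_cons, ih, h4, List.range_add, List.map_append,
      List.map_map, hmap, hg]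

theorem ggsgLinker_eq (r : Nat) : ggsgLinker r = linkerFrom 0 r := by
  have hr : r ≤ 4 * ((r + 3) / 4) := by omega
  rw [ggsgLinker, flatten_replicate_ggsg, ← List.map_take, List.take_range]
  simp [linkerFrom, Nat.min_eq_left hr]

theorem linkerFrom_succ (k n : Nat) :
    linkerFrom k (n + 1) = ggsgNext k :: linkerFrom (k + 1) n := by
  simp only [linkerFrom, List.range_succ_eq_map, List.map_cons, List.map_map, Nat.add_zero]
  exact congrArg _ (List.map_congr_left fun i _ => congrArg ggsgNext (by omega))

theorem xloopB_span (l : List Char) :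
    xloopB l = linkerFrom 0 (l.takeWhile (· == 'X')).length ++ xloopB (l.dropWhile (· == 'X')) := by
  cases l with
  | nil => simp [xloopB, linkerFrom]
  | cons b t =>
    by_cases hb : b = 'X'
    · subst hb
      rw [List.takeWhile_cons_of_pos (by simp), List.dropWhile_cons_of_pos (by simp)]
      simp [xloopB, ggsgLinker_eq, Nat.add_comm]
    · rw [List.takeWhile_cons_of_neg (by simp [hb]), List.dropWhile_cons_of_neg (by simp [hb])]
      simp [linkerFrom]

theorem xloopA_eq_span (l : List Char) : ∀ k,
    xloopA l k = linkerFrom k (l.takeWhile (· == 'X')).length ++ xloopB (l.dropWhile (· == 'X')) := by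
  induction l with
  | nil => intro k; simp [xloopA, xloopB, linkerFrom]
  | cons a t ih =>
    intro k
    by_cases ha : a = 'X'
    · subst ha
      rw [List.takeWhile_cons_of_pos (by simp), List.dropWhile_cons_of_pos (by simp)]
      simp only [xloopA, if_pos, beq_self_eq_true, List.length_cons, linkerFrom_succ,
        ih (k + 1)]
      simp
    · rw [List.takeWhile_cons_of_neg (by simp [ha]), List.dropWhile_cons_of_neg (by simp [ha])]
      have : xloopA (a :: t) k = a :: xloopA t 0 := by simp [xloopA, ha]
      rw [this, ih 0, ← xloopB_span]
      simp [xloopB, ha, linkerFrom]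

theorem xloopA_eq_xloopB (l : List Char) : xloopA l 0 = xloopB l := by
  rw [xloopA_eq_span l 0, ← xloopB_span]

-- ===== VERDICT (by name: the statement is the Claim_ definition above) =====
theorem x_to_ggsg_spec : Claim_equal_x_to_ggsg := by
  intro seq _
  unfold Spec_x_to_ggsg x_to_ggsg x_to_ggsg_alt
  split_ifs with h
  · rw [xloopA_eq_xloopB]
  · rfl
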